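-- pv_equiv track=rewrite | github.com/KessarAmine/DSA | ProblemSolving/AlgoExpertTraining/SubarraySort.py | smallest_forward
-- ===== SOURCE A (Python) =====
-- def smallest_forward(array, i):
--     j = i + 1
--     while j < len(array):
--         if array[i] == array[j] and i == j + 1:
--             continue
--         if array[i] > array[j]:
--             return False
--         j = j + 1
--     return True
-- ===== SOURCE B (Python) =====
-- def smallest_forward(array, i):
--     tail = sorted(array[i + 1:])
--     if not tail:
--         return True
--     return array[i] <= tail[0]
-- ===== Notes on version B (the rewrite author's own statement) =====
-- stated objective: alternative
-- what changed: Replaces A's guarded element-by-element short-circuiting scan with a staged 'sort the suffix, then compare array[i] against the first (smallest) element of the sorted order' decomposition.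
-- intended difference: For -len(array) <= i <= -2 (negative-index wraparound) A also scans elements before position len+i and returns False whenever any earlier element is smaller, even though array[i] <= every subsequent element; B returns True there, which is the intended 'array[i] <= all subsequent elements' answer. — e.g. on smallest_forward([1, 5, 9], -2): A returns false, B returns true
import Mathlib
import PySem

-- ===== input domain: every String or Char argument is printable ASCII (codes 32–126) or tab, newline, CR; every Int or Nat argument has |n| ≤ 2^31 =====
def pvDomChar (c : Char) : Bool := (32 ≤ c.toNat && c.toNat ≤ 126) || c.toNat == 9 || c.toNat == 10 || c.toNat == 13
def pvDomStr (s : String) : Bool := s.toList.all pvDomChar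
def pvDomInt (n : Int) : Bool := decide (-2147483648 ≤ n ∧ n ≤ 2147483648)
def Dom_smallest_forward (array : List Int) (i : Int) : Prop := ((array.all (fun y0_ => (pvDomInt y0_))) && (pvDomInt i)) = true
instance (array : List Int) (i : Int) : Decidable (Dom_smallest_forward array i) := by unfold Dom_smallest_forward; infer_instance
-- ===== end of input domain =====

-- B replaces A's guarded element-by-element scan with 'sort the suffix, compare array[i] with the first
-- element of the sorted order' (objective: alternative; not faster).

-- ===== PORT A =====
-- the while loop of A; fuel bounds the number of iterations (each step consumes one unit)
def pvALoop (array : List Int) (i : Int) (j : Int) (fuel : Nat) : Bool :=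
  match fuel with
  | 0 => true
  | fuel + 1 =>
    if j < PySem.List.len array then
      match PySem.List.pyGet? array i, PySem.List.pyGet? array j with
      | some ai, some aj =>
        if ai = aj ∧ i = j + 1 then pvALoop array i j fuel        -- 'continue'
        else if aj < ai then false                                 -- 'return False'
        else pvALoop array i (j + 1) fuel                          -- 'j = j + 1'
      | _, _ => false                                              -- IndexError (outside Pre_)
    else true

def smallest_forward (array : List Int) (i : Int) : Bool :=
  pvALoop array i (i + 1) ((PySem.List.len array - i).toNat + 1)

-- ===== PORT B =====
def smallest_forward_alt (array : List Int) (i : Int) : Bool :=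
  let tail := PySem.List.sorted (PySem.List.slice array (some (i + 1)) none) (fun x => x) false  -- sorted(array[i+1:])
  if tail.isEmpty then true                                        -- 'if not tail'
  else
    match PySem.List.pyGet? array i, PySem.List.pyGet? tail 0 with -- array[i], tail[0]
    | some ai, some m => decide (ai ≤ m)                           -- array[i] <= tail[0]
    | _, _ => false                                                -- IndexError (outside Pre_)

-- ===== PRECONDITION & SPEC =====
-- A raises IndexError exactly when its loop runs (i + 1 < len) with i below -len; Pre_ excludes only that.
def Pre_smallest_forward (array : List Int) (i : Int) : Prop :=
  -(array.length : Int) ≤ i ∨ (array.length : Int) ≤ i + 1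
instance (array : List Int) (i : Int) : Decidable (Pre_smallest_forward array i) := by
  unfold Pre_smallest_forward; infer_instance
def pvWitness_smallest_forward : List Int × Int := ([1, 2], 0)

-- For -len ≤ i ≤ -2 (negative-index wraparound) A also scans the elements BEFORE position len+i and
-- returns False whenever one of them is smaller even though array[i] ≤ every subsequent element; B returns
-- True there, the intended 'array[i] ≤ all subsequent elements' answer.
def D_smallest_forward (array : List Int) (i : Int) : Prop :=
  -(array.length : Int) ≤ i ∧ i ≤ -2 ∧
  (∃ x ∈ array.take ((array.length : Int) + i).toNat,
      x < array.getD ((array.length : Int) + i).toNat 0) ∧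
  (∀ x ∈ array.drop (((array.length : Int) + i).toNat + 1),
      array.getD ((array.length : Int) + i).toNat 0 ≤ x)
instance (array : List Int) (i : Int) : Decidable (D_smallest_forward array i) := by
  unfold D_smallest_forward; infer_instance

def Spec_smallest_forward (array : List Int) (i : Int) (out : Bool) : Prop :=
  ¬ D_smallest_forward array i → out = smallest_forward_alt array i
instance (array : List Int) (i : Int) (out : Bool) : Decidable (Spec_smallest_forward array i out) := by
  unfold Spec_smallest_forward; infer_instance

def pvDiffWitness_smallest_forward : List Int × Int := ([1, 5, 9], -2)
def pvDiffWitnessOut_smallest_forward : Bool × Bool := (false, true)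

-- ===== CLAIM (what is proved, stated in full; the proofs are below) =====
def Claim_unchanged_smallest_forward : Prop := ∀ (array : List Int) (i : Int), Dom_smallest_forward array i → Pre_smallest_forward array i → Spec_smallest_forward array i (smallest_forward array i)
def Claim_changed_smallest_forward : Prop := Dom_smallest_forward (pvDiffWitness_smallest_forward.1) (pvDiffWitness_smallest_forward.2) ∧ Pre_smallest_forward (pvDiffWitness_smallest_forward.1) (pvDiffWitness_smallest_forward.2) ∧ D_smallest_forward (pvDiffWitness_smallest_forward.1) (pvDiffWitness_smallest_forward.2) ∧ smallest_forward (pvDiffWitness_smallest_forward.1) (pvDiffWitness_smallest_forward.2) = pvDiffWitnessOut_smallest_forward.1 ∧ smallest_forward_alt (pvDiffWitness_smallest_forward.1) (pvDiffWitness_smallest_forward.2) = pvDiffWitnessOut_smallest_forward.2 ∧ pvDiffWitnessOut_smallest_forward.1 ≠ pvDiffWitnessOut_smallest_forward.2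
def Claim_exact_smallest_forward : Prop := ∀ (array : List Int) (i : Int), Dom_smallest_forward array i → Pre_smallest_forward array i → D_smallest_forward array i → smallest_forward array i ≠ smallest_forward_alt array i

-- ===== LEMMAS AND PROOFS =====

-- an in-range index never produces `none`, and the value is the total lookup
lemma pvGet_some (xs : List Int) (k : Int) (h1 : -(xs.length : Int) ≤ k) (h2 : k < (xs.length : Int)) :
    PySem.List.pyGet? xs k = some (PySem.List.pyGetD xs k 0) := by
  cases e : PySem.List.pyGet? xs k with
  | none =>
    rw [PySem.List.pyGet?_eq_none_iff] at e
    exact absurd ⟨h1, h2⟩ e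
  | some a => simp [PySem.List.pyGetD, e]

-- characterisation of A's while loop: it checks ai ≤ array[k] (wrapped) for every k in [j, len)
lemma pvALoop_char (array : List Int) (i : Int)
    (hai : PySem.List.pyGet? array i = some (PySem.List.pyGetD array i 0))
    (hil : -(array.length : Int) ≤ i) :
    ∀ (fuel : Nat) (j : Int), i + 1 ≤ j → ((array.length : Int) - j).toNat < fuel →
      pvALoop array i j fuel =
        (PySem.List.pyRange j (array.length : Int) 1).all
          (fun k => decide (PySem.List.pyGetD array i 0 ≤ PySem.List.pyGetD array k 0)) := by
  intro fuel
  induction fuel with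
  | zero => intro j _ hf; omega
  | succ n ih =>
    intro j hj hf
    by_cases hjl : j < (array.length : Int)
    · have hjget : PySem.List.pyGet? array j = some (PySem.List.pyGetD array j 0) :=
        pvGet_some array j (by omega) hjl
      rw [PySem.List.pyRange_one_cons hjl]
      simp only [pvALoop, PySem.List.len_eq, if_pos hjl, hai, hjget, List.all_cons]
      rw [if_neg (by rintro ⟨_, h2⟩; omega)]
      by_cases hcmp : PySem.List.pyGetD array j 0 < PySem.List.pyGetD array i 0
      · rw [if_pos hcmp]
        have : decide (PySem.List.pyGetD array i 0 ≤ PySem.List.pyGetD array j 0) = false := by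
          simp; omega
        simp [this]
      · rw [if_neg hcmp]
        have : decide (PySem.List.pyGetD array i 0 ≤ PySem.List.pyGetD array j 0) = true := by
          simp; omega
        rw [this, Bool.true_and]
        exact ih (j + 1) (by omega) (by omega)
    · simp only [pvALoop, PySem.List.len_eq, if_neg hjl]
      rw [PySem.List.pyRange_one_eq_nil (by omega)]
      rfl

-- a range-all over non-negative indices is an all over the dropped suffix
lemma pvAll_range_nonneg (array : List Int) (v : Int) (a : Int) (ha : 0 ≤ a) :
    (PySem.List.pyRange a (array.length : Int) 1).all
        (fun k => decide (v ≤ PySem.List.pyGetD array k 0)) =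
      (array.drop a.toNat).all (fun x => decide (v ≤ x)) := by
  rw [← PySem.List.map_pyGetD_pyRange' array 0 ha, List.all_map]
  rfl

-- B equals 'every element of the slice is ≥ array[i]': the head of the sorted slice is its minimum
lemma pvAlt_all (array : List Int) (i : Int)
    (hai : PySem.List.pyGet? array i = some (PySem.List.pyGetD array i 0)) :
    smallest_forward_alt array i =
      (PySem.List.slice array (some (i + 1)) none).all
        (fun x => decide (PySem.List.pyGetD array i 0 ≤ x)) := by
  cases e : PySem.List.sorted (PySem.List.slice array (some (i + 1)) none) (fun x => x) false with
  | nil =>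
    have hsl : PySem.List.slice array (some (i + 1)) none = [] :=
      (PySem.List.sorted_eq_nil_iff _ _ _).mp e
    unfold smallest_forward_alt
    rw [hsl]
    rfl
  | cons m t =>
    have hmmem : m ∈ PySem.List.slice array (some (i + 1)) none := by
      have : m ∈ PySem.List.sorted (PySem.List.slice array (some (i + 1)) none) (fun x => x) false := by
        rw [e]; exact List.mem_cons_self
      rwa [PySem.List.mem_sorted] at this
    have hmin : ∀ y ∈ PySem.List.slice array (some (i + 1)) none, m ≤ y :=
      PySem.List.key_head_sorted_le _ (fun x => x) e
    have hget0 : PySem.List.pyGet? (m :: t) 0 = some m := by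
      simp [PySem.List.pyGet?, PySem.List.pyIdx?]
    have hval : smallest_forward_alt array i = decide (PySem.List.pyGetD array i 0 ≤ m) := by
      unfold smallest_forward_alt
      rw [e, if_neg (by simp), hai, hget0]
    rw [hval]
    by_cases hle : PySem.List.pyGetD array i 0 ≤ m
    · rw [decide_eq_true hle]
      symm
      rw [List.all_eq_true]
      intro x hx
      exact decide_eq_true (le_trans hle (hmin x hx))
    · rw [decide_eq_false hle]
      symm
      rw [Bool.eq_false_iff]
      intro hall
      rw [List.all_eq_true] at hall
      exact hle (of_decide_eq_true (hall m hmmem))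

-- for negative starts the range-all absorbs into an all over the whole list
lemma pvAll_range_neg (array : List Int) (v : Int) (a : Int)
    (ha : a ≤ 0) (hal : -(array.length : Int) ≤ a) :
    (PySem.List.pyRange a (array.length : Int) 1).all
        (fun k => decide (v ≤ PySem.List.pyGetD array k 0)) =
      array.all (fun x => decide (v ≤ x)) := by
  rw [PySem.List.pyRange_one_append a 0 (array.length : Int) ha (by positivity), List.all_append]
  have h2 : (PySem.List.pyRange 0 (array.length : Int) 1).all
      (fun k => decide (v ≤ PySem.List.pyGetD array k 0)) = array.all (fun x => decide (v ≤ x)) := by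
    conv_rhs => rw [← PySem.List.map_pyGetD_pyRange_zero' array 0]
    rw [List.all_map]
    rfl
  rw [h2]
  by_cases hall : array.all (fun x => decide (v ≤ x)) = true
  · rw [hall, Bool.and_true]
    rw [List.all_eq_true]
    intro k hk
    rw [PySem.List.mem_pyRange_one] at hk
    have hmem : PySem.List.pyGetD array k 0 ∈ array :=
      PySem.List.pyGetD_mem array 0 ⟨by omega, by omega⟩
    rw [List.all_eq_true] at hall
    exact hall _ hmem
  · rw [Bool.not_eq_true] at hall
    rw [hall, Bool.and_false]

-- the wrapped lookup at a negative index is the element at position len + i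
lemma pvGetD_neg (array : List Int) (i : Int) (h1 : -(array.length : Int) ≤ i) (h2 : i < 0) :
    PySem.List.pyGetD array i 0 = array.getD ((array.length : Int) + i).toNat 0 := by
  have hk : i = -(((-i).toNat : Nat) : Int) := by omega
  conv_lhs => rw [hk]
  rw [PySem.List.pyGetD_neg_natCast array (-i).toNat 0 (by omega) (by omega)]
  rw [List.getD_eq_getElem array 0 (by omega : ((array.length : Int) + i).toNat < array.length)]
  congr 1
  omega

-- splitting an all over a list at a position whose element satisfies the predicate
lemma pvAll_split (l : List Int) (v : Int) (p : Nat) (hp : p < l.length) (hvp : v ≤ l[p]) :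
    l.all (fun x => decide (v ≤ x)) =
      ((l.take p).all (fun x => decide (v ≤ x)) && (l.drop (p + 1)).all (fun x => decide (v ≤ x))) := by
  conv_lhs => rw [← List.take_append_drop (p + 1) l]
  rw [List.all_append, List.take_add_one, List.all_append, List.getElem?_eq_getElem hp]
  simp [hvp]

-- ===== VERDICT (by name: the statement is the Claim_ definition above) =====
theorem smallest_forward_spec : Claim_unchanged_smallest_forward := by
  intro array i _ hpre hnd
  by_cases hlen : (array.length : Int) ≤ i + 1
  · -- no later elements: A's loop never runs, B's slice is empty
    have h0 : ¬ (i + 1 < PySem.List.len array) := by rw [PySem.List.len_eq]; omega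
    have hA : smallest_forward array i = true := by
      unfold smallest_forward
      simp only [pvALoop]
      rw [if_neg h0]
    have htail : PySem.List.slice array (some (i + 1)) none = [] := by
      rw [PySem.List.slice_from array (a := i + 1) (by omega), List.drop_eq_nil_iff]
      omega
    have hB : smallest_forward_alt array i = true := by
      unfold smallest_forward_alt
      have hs : PySem.List.sorted ([] : List Int) (fun x => x) false = [] := rfl
      simp [htail, hs]
    rw [hA, hB]
  · have hlt : i + 1 < (array.length : Int) := by omega
    have hil : -(array.length : Int) ≤ i := by
      rcases hpre with h | h
      · exact h
      · omega
    have hai : PySem.List.pyGet? array i = some (PySem.List.pyGetD array i 0) :=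
      pvGet_some array i hil (by omega)
    have hA : smallest_forward array i =
        (PySem.List.pyRange (i + 1) (array.length : Int) 1).all
          (fun k => decide (PySem.List.pyGetD array i 0 ≤ PySem.List.pyGetD array k 0)) := by
      unfold smallest_forward
      exact pvALoop_char array i hai hil _ (i + 1) (le_refl _)
        (by rw [PySem.List.len_eq]; omega)
    rw [hA, pvAlt_all array i hai]
    by_cases hineg : 0 ≤ i
    · -- non-negative index: both sides are an all over drop (i+1)
      rw [pvAll_range_nonneg array _ (i + 1) (by omega),
        PySem.List.slice_from array (a := i + 1) (by omega)]
    · -- negative index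
      rw [pvAll_range_neg array _ (i + 1) (by omega) (by omega)]
      by_cases hm1 : i = -1
      · -- i = -1: the slice is the whole list
        subst hm1
        norm_num
      · -- i ≤ -2: decompose the whole list around position p = len + i
        have hi2 : i ≤ -2 := by omega
        set p : Nat := ((array.length : Int) + i).toNat with hp
        have hplen : p < array.length := by omega
        have htail : PySem.List.slice array (some (i + 1)) none = array.drop (p + 1) := by
          rw [PySem.List.slice_some_none,
            show i + 1 = -(((-(i + 1)).toNat : Nat) : Int) by omega,
            PySem.List.clampIdx_neg_natCast _ _ (by omega)]
          congr 1
          omega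
        have hgd : PySem.List.pyGetD array i 0 = array.getD p 0 := pvGetD_neg array i hil (by omega)
        have hsplit := pvAll_split array (PySem.List.pyGetD array i 0) p hplen
          (by rw [hgd, List.getD_eq_getElem array 0 hplen])
        rw [htail, hsplit]
        -- outside D_, either no earlier element is smaller, or some later element is smaller
        unfold D_smallest_forward at hnd
        push Not at hnd
        simp only [← hp] at hnd
        rcases Classical.em ((∃ x ∈ array.take p, x < array.getD p 0)) with hex | hnex
        · -- then some later element is smaller: both sides are false
          obtain ⟨x, hx, hxd⟩ := hnd hil hi2 hex
          have hdropfalse : (array.drop (p + 1)).all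
              (fun x => decide (PySem.List.pyGetD array i 0 ≤ x)) = false := by
            rw [Bool.eq_false_iff]
            intro hall
            rw [List.all_eq_true] at hall
            have := of_decide_eq_true (hall x hx)
            rw [hgd] at this
            omega
          rw [hdropfalse, Bool.and_false]
        · -- then every earlier element is ≥ array[p]: the prefix all is true
          push Not at hnex
          have hprefix : (array.take p).all
              (fun x => decide (PySem.List.pyGetD array i 0 ≤ x)) = true := by
            rw [List.all_eq_true]
            intro x hx
            have := hnex x hx
            rw [hgd]
            exact decide_eq_true (by omega)
          rw [hprefix, Bool.true_and]

theorem smallest_forward_changed : Claim_changed_smallest_forward := by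
  unfold Claim_changed_smallest_forward; decide

theorem smallest_forward_tight : Claim_exact_smallest_forward := by
  intro array i _ _ hd
  obtain ⟨hil, hi2, ⟨x, hx, hxd⟩, hsuf⟩ := hd
  set p : Nat := ((array.length : Int) + i).toNat with hp
  have hplen : p < array.length := by omega
  have hlt : i + 1 < (array.length : Int) := by omega
  have hai : PySem.List.pyGet? array i = some (PySem.List.pyGetD array i 0) :=
    pvGet_some array i hil (by omega)
  have hgd : PySem.List.pyGetD array i 0 = array.getD p 0 := pvGetD_neg array i hil (by omega)
  -- A is false: the earlier smaller element x is hit by the wrapped scan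
  have hA : smallest_forward array i = false := by
    unfold smallest_forward
    rw [pvALoop_char array i hai hil _ (i + 1) (le_refl _) (by rw [PySem.List.len_eq]; omega),
      pvAll_range_neg array _ (i + 1) (by omega) (by omega), Bool.eq_false_iff]
    intro hall
    rw [List.all_eq_true] at hall
    have hxmem : x ∈ array := List.mem_of_mem_take hx
    have := of_decide_eq_true (hall x hxmem)
    rw [hgd] at this
    omega
  -- B is true: every later element is ≥ array[p]
  have htail : PySem.List.slice array (some (i + 1)) none = array.drop (p + 1) := by
    rw [PySem.List.slice_some_none,
      show i + 1 = -(((-(i + 1)).toNat : Nat) : Int) by omega,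
      PySem.List.clampIdx_neg_natCast _ _ (by omega)]
    congr 1
    omega
  have hB : smallest_forward_alt array i = true := by
    rw [pvAlt_all array i hai, htail, List.all_eq_true]
    intro y hy
    have := hsuf y hy
    rw [hgd]
    exact decide_eq_true (by omega)
  rw [hA, hB]
  exact Bool.false_ne_true
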